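-- pv_equiv track=rewrite | github.com/qws941/fortinet | src/security/packet_sniffer/analyzers/web_analyzer.py | _is_http_request
-- ===== SOURCE A (Python) =====
-- def _is_http_request(payload_str: str) -> bool:
--     """HTTP 요청인지 확인"""
--
--     http_methods = [
--         "GET",
--         "POST",
--         "PUT",
--         "DELETE",
--         "HEAD",
--         "OPTIONS",
--         "PATCH",
--         "TRACE",
--     ]
--     first_line = payload_str.split("\n")[0] if "\n" in payload_str else payload_str
--
--     return any(first_line.startswith(method + " ") for method in http_methods)
-- ===== SOURCE B (Python) =====
-- HTTP_METHODS = frozenset({"GET", "POST", "PUT", "DELETE", "HEAD", "OPTIONS", "PATCH", "TRACE"})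
--
--
-- def _is_http_request(payload_str: str) -> bool:
--     """HTTP 요청인지 확인"""
--     # Only the first 8 characters can matter: the longest method plus its
--     # mandatory trailing space is "OPTIONS " (8 chars), methods contain no
--     # newline, and the line split cannot change a prefix that short.
--     head = payload_str[:8]
--     i = head.find(" ")
--     return i != -1 and head[:i] in HTTP_METHODS
-- ===== Notes on version B (the rewrite author's own statement) =====
-- stated objective: faster
-- what changed: B drops the first-line extraction and the 8-way startswith scan entirely: since every method plus its trailing space fits in 8 characters and contains no newline, B inspects only payload_str[:8], finds the first space there, and does one set lookup on the token before it - O(1) regardless of payload length.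
import Mathlib
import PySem

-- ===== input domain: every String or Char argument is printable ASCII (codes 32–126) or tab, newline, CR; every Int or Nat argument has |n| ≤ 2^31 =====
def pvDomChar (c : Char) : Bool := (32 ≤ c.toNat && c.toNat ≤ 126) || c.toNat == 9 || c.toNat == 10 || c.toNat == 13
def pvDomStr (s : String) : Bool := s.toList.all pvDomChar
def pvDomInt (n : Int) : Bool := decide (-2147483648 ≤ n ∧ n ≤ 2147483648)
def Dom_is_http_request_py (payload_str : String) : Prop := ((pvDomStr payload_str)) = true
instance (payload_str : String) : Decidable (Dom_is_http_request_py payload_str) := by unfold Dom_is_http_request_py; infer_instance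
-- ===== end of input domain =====

-- B skips the line split and the 8-way startswith scan: only the first 8 characters can matter,
-- so it finds the first space in payload_str[:8] and does one set lookup on the token before it.

-- ===== PORT A =====
def pvHttpMethods : List String :=
  ["GET", "POST", "PUT", "DELETE", "HEAD", "OPTIONS", "PATCH", "TRACE"]

def is_http_request_py (payload_str : String) : Bool :=
  let first_line : String :=
    if PySem.Str.isIn "\n" payload_str then
      -- payload_str.split("\n")[0] : sep "\n" ≠ "" so split? is some, and split never returns []
      ((PySem.Str.split? payload_str "\n").getD []).headD ""
    else payload_str
  pvHttpMethods.any (fun method => PySem.Str.startswith first_line (method ++ " "))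

-- ===== PORT B =====
def pvHTTP_METHODS : PySem.Set String :=
  PySem.Set.ofList ["GET", "POST", "PUT", "DELETE", "HEAD", "OPTIONS", "PATCH", "TRACE"]

def is_http_request_py_alt (payload_str : String) : Bool :=
  let head := PySem.Str.slice payload_str none (some 8)   -- payload_str[:8]
  let i := PySem.Str.find head " "                         -- head.find(" ")  (-1 if absent)
  i != -1 && PySem.Set.contains pvHTTP_METHODS (PySem.Str.slice head none (some i))  -- head[:i] in set

-- ===== PRECONDITION & SPEC =====
def Spec_is_http_request_py (payload_str : String) (out : Bool) : Prop := out = is_http_request_py_alt payload_str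
instance (payload_str : String) (out : Bool) : Decidable (Spec_is_http_request_py payload_str out) := by unfold Spec_is_http_request_py; infer_instance

-- ===== CLAIM (what is proved, stated in full; the proofs are below) =====
def Claim_equal_is_http_request_py : Prop := ∀ (payload_str : String), Dom_is_http_request_py payload_str → Spec_is_http_request_py payload_str (is_http_request_py payload_str)

-- ===== LEMMAS AND PROOFS =====

-- splitOn.go with a one-char separator: the first produced piece is cur.reverse ++ (everything before the first sep)
theorem pv_go_head (c : Char) : ∀ (fuel : Nat) (cs cur : List Char) (acc : List (List Char)), cs.length < fuel →
    ∃ t, PySem.Chars.splitOn.go [c] fuel cs cur acc = acc.reverse ++ (cur.reverse ++ cs.takeWhile (fun x => x != c)) :: t := by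
  intro fuel
  induction fuel with
  | zero => intro cs cur acc h; exact absurd h (Nat.not_lt_zero _)
  | succ fuel ih =>
    intro cs cur acc h
    cases cs with
    | nil => exact ⟨[], by simp [PySem.Chars.splitOn.go]⟩
    | cons x xs =>
      by_cases hx : x = c
      · subst hx
        obtain ⟨t, ht⟩ := ih xs [] (cur.reverse :: acc) (by simpa using Nat.lt_of_succ_lt_succ h)
        refine ⟨(List.takeWhile (fun y => y != x) xs) :: t, ?_⟩
        simp [PySem.Chars.splitOn.go] at ht ⊢
        rw [ht]
      · obtain ⟨t, ht⟩ := ih xs (x :: cur) acc (by simpa using Nat.lt_of_succ_lt_succ h)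
        refine ⟨t, ?_⟩
        have hb : (x != c) = true := by simpa using hx
        simp [PySem.Chars.splitOn.go, Ne.symm hx] at ht ⊢
        rw [ht]
        simp [hb]

theorem pv_splitOn_head (c : Char) (cs : List Char) :
    ∃ t, PySem.Chars.splitOn cs [c] = (cs.takeWhile (fun x => x != c)) :: t := by
  obtain ⟨t, ht⟩ := pv_go_head c (cs.length + 1) cs [] [] (Nat.lt_succ_self _)
  exact ⟨t, by simpa [PySem.Chars.splitOn] using ht⟩

-- the key partition/startswith correspondence
theorem pv_prefix_iff (m : List Char) : ∀ (l : List Char), ' ' ∉ m →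
    ((m ++ [' ']).isPrefixOf l = true ↔
      l.takeWhile (fun c => c != ' ') = m ∧ l.dropWhile (fun c => c != ' ') ≠ []) := by
  induction m with
  | nil =>
    intro l _
    cases l with
    | nil => simp
    | cons x xs =>
      by_cases hx : x = ' '
      · subst hx; simp [List.isPrefixOf, List.takeWhile, List.dropWhile]
      · have hb : (x != ' ') = true := by simpa using hx
        simp [List.isPrefixOf, List.takeWhile, List.dropWhile, hb, Ne.symm hx]
  | cons a m ih =>
    intro l hm
    have ha : a ≠ ' ' := fun h => hm (h ▸ List.mem_cons_self)
    have hm' : ' ' ∉ m := fun h => hm (List.mem_cons_of_mem _ h)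
    cases l with
    | nil => simp
    | cons x xs =>
      by_cases hx : x = ' '
      · subst hx
        simp [List.takeWhile]
        intro h
        exact absurd h ha
      · have hb : (x != ' ') = true := by simpa using hx
        simp [List.isPrefixOf, List.takeWhile, List.dropWhile, hb, ih xs hm']
        tauto

-- the token / first-space characterisation of the 8-way scan
set_option maxHeartbeats 1000000 in
theorem pv_main (l : List Char) :
    pvHttpMethods.any (fun method => PySem.Chars.startswith l (method.toList ++ [' '])) =
      (!(l.dropWhile (fun c => c != ' ')).isEmpty &&
        PySem.Set.contains pvHTTP_METHODS (String.ofList (l.takeWhile (fun c => c != ' ')))) := by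
  rw [Bool.eq_iff_iff]
  have hof : ∀ (t : List Char) (s : String), (String.ofList t = s) ↔ t = s.toList := by
    intro t s
    constructor
    · intro h; have := congrArg String.toList h; simpa using this
    · intro h; subst h; simp
  have hset : pvHTTP_METHODS = ["GET", "POST", "PUT", "DELETE", "HEAD", "OPTIONS", "PATCH", "TRACE"] := by decide
  simp only [pvHttpMethods, hset, PySem.Chars.startswith, List.any_cons, List.any_nil,
    Bool.or_eq_true, Bool.and_eq_true, Bool.not_eq_true', List.isEmpty_eq_false_iff]
  rw [pv_prefix_iff _ l (by decide), pv_prefix_iff _ l (by decide), pv_prefix_iff _ l (by decide),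
    pv_prefix_iff _ l (by decide), pv_prefix_iff _ l (by decide), pv_prefix_iff _ l (by decide),
    pv_prefix_iff _ l (by decide), pv_prefix_iff _ l (by decide)]
  simp only [PySem.Set.contains, List.contains_eq_mem, List.mem_cons,
    List.not_mem_nil, decide_eq_true_eq, hof]
  tauto

-- no separator present: takeWhile is the identity
theorem pv_takeWhile_of_not_mem (c : Char) : ∀ (l : List Char), c ∉ l → l.takeWhile (fun x => x != c) = l := by
  intro l hc
  apply List.takeWhile_eq_self_iff.mpr
  intro x hx
  have : x ≠ c := fun h => hc (h ▸ hx)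
  simp [this]

-- the first line of A equals takeWhile (· != '\n')
theorem pv_first_line (p : String) :
    (if PySem.Str.isIn "\n" p then ((PySem.Str.split? p "\n").getD []).headD "" else p).toList
      = p.toList.takeWhile (fun c => c != '\n') := by
  by_cases h : PySem.Str.isIn "\n" p = true
  · rw [if_pos h]
    obtain ⟨t, ht⟩ := pv_splitOn_head '\n' p.toList
    have hnl : ("\n" : String).toList = ['\n'] := rfl
    simp [PySem.Str.split?, PySem.Chars.split?, hnl, ht]
  · rw [if_neg h]
    have hni : ¬ ('\n' ∈ p.toList) := by
      have h2 : PySem.Str.isIn "\n" p = false := by simpa using h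
      rw [PySem.Str.isIn_eq] at h2
      intro hmem
      obtain ⟨s, t, hst⟩ := List.append_of_mem hmem
      have hnl : ("\n" : String).toList = ['\n'] := rfl
      have hinf : ("\n" : String).toList <:+: p.toList := ⟨s, t, by simp [hst, hnl]⟩
      exact (PySem.Chars.isIn_eq_false_iff _ _).mp h2 hinf
    exact (pv_takeWhile_of_not_mem _ _ hni).symm

-- a prefix all of whose elements satisfy p is a prefix of takeWhile p
theorem pv_prefix_takeWhile (p : Char → Bool) (m : List Char) (l : List Char)
    (hall : ∀ c ∈ m, p c = true) : (m <+: l.takeWhile p) ↔ m <+: l := by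
  constructor
  · intro h; exact h.trans (List.takeWhile_prefix p)
  · rintro ⟨t, ht⟩
    subst ht
    rw [List.takeWhile_append, if_pos (by rw [List.takeWhile_eq_self_iff.mpr hall])]
    exact ⟨t.takeWhile p, rfl⟩

-- a prefix of bounded length survives 'take n'
theorem pv_prefix_take (m l : List Char) (n : Nat) (hlen : m.length ≤ n) :
    (m <+: l.take n) ↔ m <+: l := by
  rw [List.prefix_take_iff]
  exact and_iff_left hlen

-- one method: scanning the first line equals scanning the first 8 characters
theorem pv_method_take8 (m : List Char) (l : List Char)
    (hn : '\n' ∉ m) (hlen : m.length + 1 ≤ 8) :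
    PySem.Chars.startswith (l.takeWhile (fun c => c != '\n')) (m ++ [' '])
      = PySem.Chars.startswith (l.take 8) (m ++ [' ']) := by
  rw [Bool.eq_iff_iff, PySem.Chars.startswith_iff, PySem.Chars.startswith_iff]
  have hall : ∀ c ∈ m ++ [' '], (c != '\n') = true := by
    intro c hc
    rcases List.mem_append.mp hc with h | h
    · have : c ≠ '\n' := fun he => hn (he ▸ h)
      simpa using this
    · simp at h; subst h; decide
  rw [pv_prefix_takeWhile _ _ l hall, pv_prefix_take _ l 8 (by simpa using hlen)]

-- [c] is a prefix of l.drop i exactly when l[i]? = some c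
theorem pv_single_prefix_drop (c : Char) (l : List Char) (i : Nat) :
    ([c] <+: l.drop i) ↔ l[i]? = some c := by
  rw [← List.head?_drop]
  cases h : l.drop i with
  | nil => simp
  | cons x xs =>
    simp only [List.head?_cons]
    constructor
    · rintro ⟨t, ht⟩
      simp at ht
      simp [ht.1]
    · intro hx
      simp at hx
      exact ⟨xs, by simp [hx]⟩

-- singleton infix ↔ membership
theorem pv_single_infix (c : Char) (l : List Char) : ([c] <:+: l) ↔ c ∈ l := by
  constructor
  · rintro ⟨s, t, h⟩; subst h; simp
  · intro h
    obtain ⟨s, t, hst⟩ := List.append_of_mem h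
    exact ⟨s, t, by simp [hst]⟩

-- if ' ' occurs in l, the dropWhile at ' ' is nonempty
theorem pv_dropWhile_ne (l : List Char) (hmem : ' ' ∈ l) :
    (l.dropWhile (fun c => c != ' ')).isEmpty = false := by
  rw [List.isEmpty_eq_false_iff]
  intro he
  have hall := List.dropWhile_eq_nil_iff.mp he
  have : (' ' != ' ') = true := hall _ hmem
  simp at this

-- find of the single char ' ' points at the end of takeWhile
theorem pv_find_space (l : List Char) (hmem : ' ' ∈ l) :
    PySem.Chars.find l [' '] = (((l.takeWhile (fun c => c != ' ')).length : Nat) : Int) := by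
  set j := (l.takeWhile (fun c => c != ' ')).length with hj
  have hinf : ([' '] : List Char) <:+: l := (pv_single_infix _ _).mpr hmem
  have hpos : 0 ≤ PySem.Chars.find l [' '] := (PySem.Chars.find_nonneg_iff _ _).mpr hinf
  obtain ⟨hpre, hmin⟩ := PySem.Chars.find_spec hpos
  have htake : l.takeWhile (fun c => c != ' ') = l.take j := by
    exact List.prefix_iff_eq_take.mp (List.takeWhile_prefix _)
  have hjget : l[j]? = some ' ' := by
    have hd := pv_dropWhile_ne l hmem
    rw [List.isEmpty_eq_false_iff] at hd
    have hsplit : l = l.takeWhile (fun c => c != ' ') ++ l.dropWhile (fun c => c != ' ') :=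
      (List.takeWhile_append_dropWhile).symm
    cases hdw : l.dropWhile (fun c => c != ' ') with
    | nil => exact absurd hdw hd
    | cons x xs =>
      have hx : ¬ (x != ' ') = true := by
        have := List.head_dropWhile_not (fun c => c != ' ') (l := l) (by rw [hdw]; simp)
        simpa [hdw] using this
      have hx' : x = ' ' := by simpa using hx
      conv_lhs => rw [hsplit, hdw, hx']
      rw [List.getElem?_append_right (by omega)]
      simp [hj]
  have hlt : ∀ i, i < j → l[i]? ≠ some ' ' := by
    intro i hi hsome
    have h1 : l[i]? = (l.takeWhile (fun c => c != ' '))[i]? := by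
      rw [htake, List.getElem?_take_of_lt hi]
    rw [h1] at hsome
    have hmemt : ' ' ∈ l.takeWhile (fun c => c != ' ') := by
      exact List.mem_of_getElem? hsome
    have : (' ' != ' ') = true := List.mem_takeWhile_imp (p := fun c => c != ' ') hmemt
    simp at this
  -- find.toNat = j
  have hfj : (PySem.Chars.find l [' ']).toNat = j := by
    rcases Nat.lt_trichotomy (PySem.Chars.find l [' ']).toNat j with h | h | h
    · exact absurd ((pv_single_prefix_drop _ _ _).mp hpre) (hlt _ h)
    · exact h
    · exact absurd ((pv_single_prefix_drop _ _ _).mpr hjget) (hmin j h)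
  omega

-- the 8-way scan over the first line equals the scan over the first 8 characters
set_option maxHeartbeats 1000000 in
theorem pv_any_take8 (l : List Char) :
    pvHttpMethods.any (fun m => PySem.Chars.startswith (l.takeWhile (fun c => c != '\n')) (m.toList ++ [' '])) =
      pvHttpMethods.any (fun m => PySem.Chars.startswith (l.take 8) (m.toList ++ [' '])) := by
  simp only [pvHttpMethods, List.any_cons, List.any_nil]
  rw [pv_method_take8 _ l (by decide) (by decide), pv_method_take8 _ l (by decide) (by decide),
    pv_method_take8 _ l (by decide) (by decide), pv_method_take8 _ l (by decide) (by decide),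
    pv_method_take8 _ l (by decide) (by decide), pv_method_take8 _ l (by decide) (by decide),
    pv_method_take8 _ l (by decide) (by decide), pv_method_take8 _ l (by decide) (by decide)]

-- ===== VERDICT (by name: the statement is the Claim_ definition above) =====
theorem is_http_request_py_spec : Claim_equal_is_http_request_py := by
  intro p _
  show is_http_request_py p = is_http_request_py_alt p
  unfold is_http_request_py is_http_request_py_alt
  simp only [PySem.Str.startswith_eq]
  rw [pv_first_line p]
  have htl : ∀ m : String, (m ++ " ").toList = m.toList ++ [' '] := by
    intro m; simp
  simp only [htl]
  rw [pv_any_take8 p.toList, pv_main (p.toList.take 8)]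
  -- the head string of B
  have hhead : (PySem.Str.slice p none (some 8)).toList = p.toList.take 8 := by
    simp [PySem.Str.toList_slice]
    rw [show ((8 : Int)) = ((8 : Nat) : Int) from by norm_num, PySem.List.slice_to_natCast]
  have hh8 : PySem.List.slice p.toList none (some 8) = p.toList.take 8 := by
    simpa [PySem.Str.toList_slice] using hhead
  set h := p.toList.take 8 with hh
  have hfind : PySem.Str.find (PySem.Str.slice p none (some 8)) " " = PySem.Chars.find h [' '] := by
    rw [PySem.Str.find_eq, hhead]; rfl
  by_cases hmem : ' ' ∈ h
  · have hf := pv_find_space h hmem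
    set j := (h.takeWhile (fun c => c != ' ')).length with hj
    rw [hfind, hf]
    have hne : ((j : Int) != -1) = true := by simp
    rw [hne, Bool.true_and, pv_dropWhile_ne h hmem, Bool.not_false, Bool.true_and]
    congr 1
    have hslice : (PySem.Str.slice (PySem.Str.slice p none (some 8)) none (some (j : Int))).toList
        = h.takeWhile (fun c => c != ' ') := by
      simp [PySem.Str.toList_slice]
      rw [hh8]
      exact (List.prefix_iff_eq_take.mp (List.takeWhile_prefix _)).symm
    calc String.ofList (h.takeWhile (fun c => c != ' '))
        = String.ofList (PySem.Str.slice (PySem.Str.slice p none (some 8)) none (some (j : Int))).toList := by rw [hslice]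
      _ = PySem.Str.slice (PySem.Str.slice p none (some 8)) none (some (j : Int)) := String.ofList_toList
  · have hdw : (h.dropWhile (fun c => c != ' ')).isEmpty = true := by
      rw [List.isEmpty_iff, List.dropWhile_eq_nil_iff]
      intro x hx
      have : x ≠ ' ' := fun he => hmem (he ▸ hx)
      simpa using this
    rw [hdw]
    have hf : PySem.Chars.find h [' '] = -1 := by
      rw [PySem.Chars.find_eq_neg_one_iff]
      rw [pv_single_infix]
      exact hmem
    rw [hfind, hf]
    simp
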